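-- pv_equiv track=rewrite | github.com/GMainardi/Advent-2024 | day09/a.py | disk_to_fill
-- ===== SOURCE A (Python) =====
-- def get_last_filled_idx(disk):
--
--     return sum([val[0] for val in disk if val[1] != '.'])
--
-- def disk_to_fill(disk):
--     spaces = get_last_filled_idx(disk)
--
--
--     compacted_disk_size = 0
--     for idx, (space, id) in enumerate(disk):
--         compacted_disk_size += space
--         if compacted_disk_size == spaces:
--             return disk[:idx], disk[idx:][::-1]
--
--         if compacted_disk_size > spaces:
--             split_space = (compacted_disk_size - spaces)
--             return disk[:idx] + [(space - split_space, id)],  disk[idx+1:][::-1] + [(split_space, id)]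
-- ===== SOURCE B (Python) =====
-- def disk_to_fill(disk):
--     spaces = sum(space for space, ident in disk if ident != '.')
--     cum = []
--     total = 0
--     for space, _ in disk:
--         total += space
--         cum.append(total)
--     # binary search for the first index with cum[idx] >= spaces
--     # (cum is nondecreasing when all block sizes are nonnegative)
--     lo, hi = 0, len(disk)
--     while lo < hi:
--         mid = (lo + hi) // 2
--         if cum[mid] >= spaces:
--             hi = mid
--         else:
--             lo = mid + 1
--     idx = lo
--     space, ident = disk[idx]
--     head, tail = disk[:idx], disk[idx:]
--     if cum[idx] == spaces:
--         return head, tail[::-1]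
--     split = cum[idx] - spaces
--     return head + [(space - split, ident)], tail[1:][::-1] + [(split, ident)]
-- ===== Notes on version B (the rewrite author's own statement) =====
-- stated objective: alternative
-- what changed: B precomputes the prefix-sum list of block sizes and locates the split point by binary search on it, instead of A's early-return linear scan with a running accumulator.
-- outside the precondition, e.g. on disk_to_fill([]): A returns None, B raises IndexError
import Mathlib
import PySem

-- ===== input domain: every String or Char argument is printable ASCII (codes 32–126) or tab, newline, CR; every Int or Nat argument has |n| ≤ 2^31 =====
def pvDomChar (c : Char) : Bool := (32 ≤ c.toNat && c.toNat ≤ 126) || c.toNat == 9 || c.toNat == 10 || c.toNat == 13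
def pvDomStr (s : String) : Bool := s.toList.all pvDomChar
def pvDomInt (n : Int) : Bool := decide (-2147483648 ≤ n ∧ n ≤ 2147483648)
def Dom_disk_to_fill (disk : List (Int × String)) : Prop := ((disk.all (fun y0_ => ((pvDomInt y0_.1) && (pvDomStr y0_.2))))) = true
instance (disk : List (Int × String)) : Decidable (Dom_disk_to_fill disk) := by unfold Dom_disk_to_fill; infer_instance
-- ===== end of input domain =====

-- B replaces A's early-return accumulator scan by a prefix-sum list plus a binary search for
-- the split index (objective: alternative decomposition, same asymptotic cost).

-- ===== PORT A =====
def get_last_filled_idx (disk : List (Int × String)) : Int :=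
  ((disk.filter (fun v => v.2 != ".")).map (fun v => v.1)).sum

-- the for-loop over enumerate(disk): suffix still to visit, current idx, running compacted size.
-- disk[:idx] / disk[idx:] are List.take / List.drop (exact: 0 ≤ idx ≤ len disk here).
def diskToFillGo (disk : List (Int × String)) (spaces : Int) :
    List (Int × String) → Nat → Int → (List (Int × String)) × (List (Int × String))
  | [], _, _ => ([], [])  -- Python falls through and returns None here; excluded by Pre_
  | (space, id) :: rest, idx, compacted =>
    let c := compacted + space
    if c = spaces then (disk.take idx, (disk.drop idx).reverse)
    else if spaces < c then
      (disk.take idx ++ [(space - (c - spaces), id)],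
       (disk.drop (idx + 1)).reverse ++ [(c - spaces, id)])
    else diskToFillGo disk spaces rest (idx + 1) c

def disk_to_fill (disk : List (Int × String)) : (List (Int × String)) × (List (Int × String)) :=
  diskToFillGo disk (get_last_filled_idx disk) disk 0 0

-- ===== PORT B =====
-- the prefix-sum building loop of Source B
def cumBuild : List (Int × String) → Int → List Int
  | [], _ => []
  | (s, _) :: rest, total => (total + s) :: cumBuild rest (total + s)

-- the while-loop binary search of Source B; cum[mid] is in range whenever lo < hi ≤ len cum (getD 0 exact there)
def bsearchFirst (cum : List Int) (spaces : Int) (lo hi : Nat) : Nat :=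
  if h : lo < hi then
    let mid := (lo + hi) / 2
    if spaces ≤ cum.getD mid 0 then bsearchFirst cum spaces lo mid
    else bsearchFirst cum spaces (mid + 1) hi
  else lo
termination_by hi - lo
decreasing_by
  · omega
  · omega

def disk_to_fill_alt (disk : List (Int × String)) : (List (Int × String)) × (List (Int × String)) :=
  let spaces := ((disk.filter (fun p => p.2 != ".")).map (fun p => p.1)).sum
  let cum := cumBuild disk 0
  let idx := bsearchFirst cum spaces 0 disk.length
  -- disk[idx] is in range under Pre_; getD is exact there
  let space := (disk.getD idx (0, "")).1
  let ident := (disk.getD idx (0, "")).2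
  let head := disk.take idx
  let tail := disk.drop idx
  if cum.getD idx 0 = spaces then (head, tail.reverse)
  else
    let split := cum.getD idx 0 - spaces
    (head ++ [(space - split, ident)], (tail.drop 1).reverse ++ [(split, ident)])

-- ===== PRECONDITION & SPEC =====
-- Pre_ restricts to the natural domain of these disk maps: a nonempty disk with nonnegative
-- block sizes (plus the always-safe singleton-without-'.' case).  Outside it A's loop may fall
-- through and return None (not a pair), and on negative sizes the prefix sums are not monotone,
-- so the two boundary searches may legitimately land on different indices.
def Pre_disk_to_fill (disk : List (Int × String)) : Prop :=
  disk ≠ [] ∧ ((∀ p ∈ disk, 0 ≤ p.1) ∨ (disk.length = 1 ∧ ∀ p ∈ disk, p.2 ≠ "."))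
instance (disk : List (Int × String)) : Decidable (Pre_disk_to_fill disk) := by
  unfold Pre_disk_to_fill; infer_instance

def pvWitness_disk_to_fill : (List (Int × String)) := [((1 : Int), "a")]

def Spec_disk_to_fill (disk : List (Int × String)) (out : (List (Int × String)) × (List (Int × String))) : Prop := out = disk_to_fill_alt disk
instance (disk : List (Int × String)) (out : (List (Int × String)) × (List (Int × String))) : Decidable (Spec_disk_to_fill disk out) := by unfold Spec_disk_to_fill; infer_instance

-- ===== CLAIM (what is proved, stated in full; the proofs are below) =====
def Claim_equal_disk_to_fill : Prop := ∀ (disk : List (Int × String)), Dom_disk_to_fill disk → Pre_disk_to_fill disk → Spec_disk_to_fill disk (disk_to_fill disk)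

-- ===== LEMMAS AND PROOFS =====

-- sum of the sizes of the first k blocks
def psum (disk : List (Int × String)) (k : Nat) : Int :=
  ((disk.take k).map (fun p => p.1)).sum

-- the common value both programs return once the split index J is known
def answerAt (disk : List (Int × String)) (spaces : Int) (J : Nat) :
    (List (Int × String)) × (List (Int × String)) :=
  if psum disk (J + 1) = spaces then (disk.take J, (disk.drop J).reverse)
  else
    (disk.take J ++ [((disk.getD J (0, "")).1 - (psum disk (J + 1) - spaces), (disk.getD J (0, "")).2)],
     (disk.drop (J + 1)).reverse ++ [(psum disk (J + 1) - spaces, (disk.getD J (0, "")).2)])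

lemma psum_succ (disk : List (Int × String)) (k : Nat) (h : k < disk.length) :
    psum disk (k + 1) = psum disk k + (disk.getD k (0, "")).1 := by
  unfold psum
  rw [List.getD_eq_getElem _ _ h, List.map_take, List.map_take]
  have h' : k < (disk.map (fun p => p.1)).length := by simpa using h
  rw [List.sum_take_succ _ k h']
  simp

lemma cumBuild_length (disk : List (Int × String)) (t : Int) :
    (cumBuild disk t).length = disk.length := by
  induction disk generalizing t with
  | nil => simp [cumBuild]
  | cons x rest ih => cases x with | mk s i => simp [cumBuild, ih]

lemma cumBuild_getD (disk : List (Int × String)) (t : Int) (i : Nat) (h : i < disk.length) :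
    (cumBuild disk t).getD i 0 = t + psum disk (i + 1) := by
  induction disk generalizing t i with
  | nil => simp at h
  | cons x rest ih =>
    cases x with | mk s idn =>
    cases i with
    | zero => simp [cumBuild, psum]
    | succ i =>
      simp only [cumBuild, List.getD_cons_succ]
      rw [ih (t + s) i (by simpa using h)]
      have : psum ((s, idn) :: rest) (i + 1 + 1) = s + psum rest (i + 1) := by
        simp [psum]
      rw [this]; ring

lemma psum_mono (disk : List (Int × String)) (hnn : ∀ p ∈ disk, 0 ≤ p.1)
    {i j : Nat} (hij : i ≤ j) : psum disk i ≤ psum disk j := by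
  induction j with
  | zero =>
    have : i = 0 := by omega
    subst this; exact le_refl _
  | succ j ih =>
    rcases Nat.lt_or_ge j disk.length with hj | hj
    · rcases Nat.eq_or_lt_of_le hij with rfl | hlt
      · exact le_refl _
      · have h1 : psum disk i ≤ psum disk j := ih (by omega)
        have h2 : 0 ≤ (disk.getD j (0, "")).1 := by
          rw [List.getD_eq_getElem _ _ hj]
          exact hnn _ (List.getElem_mem hj)
        rw [psum_succ disk j hj]; omega
    · have : psum disk (j + 1) = psum disk j := by
        unfold psum
        rw [List.take_of_length_le (by omega), List.take_of_length_le (by omega)]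
      rcases Nat.eq_or_lt_of_le hij with rfl | hlt
      · exact le_refl _
      · rw [this]; exact ih (by omega)

lemma filter_sum_le (l : List (Int × String)) (hnn : ∀ p ∈ l, 0 ≤ p.1) :
    ((l.filter (fun p => p.2 != ".")).map (fun p => p.1)).sum ≤ (l.map (fun p => p.1)).sum := by
  induction l with
  | nil => simp
  | cons x rest ih =>
    have hx : 0 ≤ x.1 := hnn x (List.mem_cons_self)
    have ih' := ih (fun p hp => hnn p (List.mem_cons_of_mem _ hp))
    by_cases h : x.2 != "."
    · simp [h]; omega
    · simp [h]; omega

-- A's loop, started at position k with the correct running sum, lands on the branch at J.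
lemma loopA_eq (disk : List (Int × String)) (spaces : Int) (J : Nat)
    (hJlen : J < disk.length) (hJge : spaces ≤ psum disk (J + 1))
    (hJleast : ∀ i < J, psum disk (i + 1) < spaces) :
    ∀ k, k ≤ J →
      diskToFillGo disk spaces (disk.drop k) k (psum disk k) = answerAt disk spaces J := by
  intro k hk
  induction hd : J - k generalizing k with
  | zero =>
    have hkJ : k = J := by omega
    subst hkJ
    have hdrop : disk.drop k = disk[k] :: disk.drop (k + 1) :=
      List.drop_eq_getElem_cons hJlen
    rw [hdrop]
    cases hx : disk[k] with | mk space idn =>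
    have hget : disk.getD k (0, "") = (space, idn) := by
      rw [List.getD_eq_getElem _ _ hJlen, hx]
    have hc : psum disk k + space = psum disk (k + 1) := by
      rw [psum_succ disk k hJlen, hget]
    simp only [diskToFillGo]
    rw [hc]
    unfold answerAt
    by_cases heq : psum disk (k + 1) = spaces
    · simp [heq]
    · have hlt : spaces < psum disk (k + 1) := lt_of_le_of_ne hJge (Ne.symm heq)
      simp [heq, hlt, List.getElem?_eq_getElem hJlen, hx]
  | succ n ih =>
    have hkJ : k < J := by omega
    have hklen : k < disk.length := by omega
    have hdrop : disk.drop k = disk[k] :: disk.drop (k + 1) :=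
      List.drop_eq_getElem_cons hklen
    rw [hdrop]
    cases hx : disk[k] with | mk space idn =>
    have hget : disk.getD k (0, "") = (space, idn) := by
      rw [List.getD_eq_getElem _ _ hklen, hx]
    have hc : psum disk k + space = psum disk (k + 1) := by
      rw [psum_succ disk k hklen, hget]
    have hlt : psum disk (k + 1) < spaces := hJleast k hkJ
    simp only [diskToFillGo]
    rw [hc]
    have h1 : ¬ (psum disk (k + 1) = spaces) := by omega
    have h2 : ¬ (spaces < psum disk (k + 1)) := by omega
    simp only [h1, h2, if_false]
    exact ih (k + 1) (by omega) (by omega)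

-- the binary search finds the least index with cum ≥ spaces
lemma bsearch_eq (cum : List Int) (spaces : Int) (J : Nat)
    (hJge : spaces ≤ cum.getD J 0)
    (hJleast : ∀ i < J, cum.getD i 0 < spaces)
    (hmono : ∀ i j : Nat, i ≤ j → j < cum.length → cum.getD i 0 ≤ cum.getD j 0) :
    ∀ lo hi, lo ≤ J → J ≤ hi → hi ≤ cum.length →
      bsearchFirst cum spaces lo hi = J := by
  intro lo hi
  induction hd : hi - lo using Nat.strong_induction_on generalizing lo hi with
  | _ n ih =>
    intro hlo hhi hhilen
    by_cases h : lo < hi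
    · rw [bsearchFirst]
      simp only [h, dif_pos]
      set mid := (lo + hi) / 2 with hmid
      have hmlo : lo ≤ mid := by omega
      have hmhi : mid < hi := by omega
      by_cases hge : spaces ≤ cum.getD mid 0
      · have hJm : J ≤ mid := by
          by_contra hcon
          exact absurd hge (not_le.mpr (hJleast mid (by omega)))
        rw [if_pos hge]
        exact ih (mid - lo) (by omega) lo mid rfl hlo hJm (by omega)
      · have hmJ : mid < J := by
          by_contra hcon
          have : cum.getD J 0 ≤ cum.getD mid 0 := hmono J mid (by omega) (by omega)
          omega
        rw [if_neg hge]
        exact ih (hi - (mid + 1)) (by omega) (mid + 1) hi rfl (by omega) hhi hhilen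
    · rw [bsearchFirst]
      simp only [h, dif_neg, not_false_iff]
      omega

-- B computes answerAt at the binary-search index
lemma altB_eq (disk : List (Int × String)) (spaces : Int) (J : Nat)
    (hs : spaces = ((disk.filter (fun p => p.2 != ".")).map (fun p => p.1)).sum)
    (hJlen : J < disk.length)
    (hfind : bsearchFirst (cumBuild disk 0) spaces 0 disk.length = J) :
    disk_to_fill_alt disk = answerAt disk spaces J := by
  simp only [disk_to_fill_alt]
  rw [← hs, hfind]
  have hcg : (cumBuild disk 0).getD J 0 = psum disk (J + 1) := by
    rw [cumBuild_getD disk 0 J hJlen]; ring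
  rw [hcg]
  unfold answerAt
  by_cases heq : psum disk (J + 1) = spaces
  · simp [heq]
  · simp only [heq, if_false]
    have : (disk.drop J).drop 1 = disk.drop (J + 1) := by
      rw [List.drop_drop]
    rw [this]

-- ===== VERDICT (by name: the statement is the Claim_ definition above) =====
theorem disk_to_fill_spec : Claim_equal_disk_to_fill := by
  intro disk hDom hPre
  obtain ⟨hne, hcase⟩ := hPre
  unfold Spec_disk_to_fill
  set spaces := ((disk.filter (fun p => p.2 != ".")).map (fun p => p.1)).sum with hs
  have hlenpos : 0 < disk.length := List.length_pos_iff.mpr hne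
  -- spaces ≤ total size = psum at the last index (in the singleton case with equality)
  have htot : spaces ≤ psum disk disk.length := by
    rcases hcase with hnn | ⟨h1, hnd⟩
    · rw [hs]
      unfold psum
      rw [List.take_of_length_le (le_refl _)]
      exact filter_sum_le disk hnn
    · rcases disk with _ | ⟨x, rest⟩
      · simp at h1
      · have hrest : rest = [] := by
          simpa using h1
        subst hrest
        have hx : x.2 ≠ "." := hnd x (List.mem_cons_self)
        rw [hs]
        simp [psum, hx]
  have hex : ∃ i, i < disk.length ∧ spaces ≤ psum disk (i + 1) := by
    refine ⟨disk.length - 1, by omega, ?_⟩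
    have : disk.length - 1 + 1 = disk.length := by omega
    rw [this]; exact htot
  classical
  let J := Nat.find hex
  have hJspec := Nat.find_spec hex
  have hJlen : J < disk.length := hJspec.1
  have hJge : spaces ≤ psum disk (J + 1) := hJspec.2
  have hJleast : ∀ i < J, psum disk (i + 1) < spaces := by
    intro i hi
    have := Nat.find_min hex hi
    simp only [not_and, not_le] at this
    rcases Nat.lt_or_ge i disk.length with h | h
    · exact this h
    · omega
  -- A's side
  have hA : disk_to_fill disk = answerAt disk spaces J := by
    unfold disk_to_fill get_last_filled_idx
    have h0 : psum disk 0 = 0 := by simp [psum]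
    have := loopA_eq disk spaces J hJlen hJge hJleast 0 (Nat.zero_le _)
    rw [List.drop_zero, h0] at this
    exact this
  -- B's side
  have hmono : ∀ i j : Nat, i ≤ j → j < (cumBuild disk 0).length →
      (cumBuild disk 0).getD i 0 ≤ (cumBuild disk 0).getD j 0 := by
    intro i j hij hj
    rw [cumBuild_length] at hj
    rcases hcase with hnn | ⟨h1, _⟩
    · rw [cumBuild_getD disk 0 i (by omega), cumBuild_getD disk 0 j hj]
      have := psum_mono disk hnn (i := i + 1) (j := j + 1) (by omega)
      omega
    · have hi0 : i = 0 := by omega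
      have hj0 : j = 0 := by omega
      subst hi0; subst hj0; exact le_refl _
  have hfind : bsearchFirst (cumBuild disk 0) spaces 0 disk.length = J := by
    have hlen : (cumBuild disk 0).length = disk.length := cumBuild_length disk 0
    apply bsearch_eq (cumBuild disk 0) spaces J
    · rw [cumBuild_getD disk 0 J hJlen]; simpa using hJge
    · intro i hi
      have hiL : i < disk.length := by omega
      rw [cumBuild_getD disk 0 i hiL]
      have := hJleast i hi; omega
    · exact hmono
    · exact Nat.zero_le _
    · omega
    · omega
  have hB : disk_to_fill_alt disk = answerAt disk spaces J :=
    altB_eq disk spaces J hs hJlen hfind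
  rw [hA, hB]
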